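-- pv_equiv track=rewrite | github.com/valanto/adventOfCode | 2024/day6.py | compact_positions
-- ===== SOURCE A (Python) =====
-- def move(position):
--   (y,x,d) = position
--   if d == 0:
--     return (y-1, x, d)
--   elif d == 1:
--     return (y, x+1, d)
--   elif d == 2:
--     return (y+1, x, d)
--   elif d == 3:
--     return (y, x-1, d)
--
-- def find_distance(positions, y, x, d):
--   count = 0
--   while y > 0 and x > 0 and y < len(positions) and x < len(positions[y]) and positions[y][x] == 0:
--     (y, x, d) = move((y, x, d))
--     count+=1
--   return count
--
-- def compact_positions(positions):
--   compact = dict()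
--   for y in range(len(positions)):
--     for x in range(len(positions[y])):
--       compact[(y,x)]=dict()
--       compact[(y,x)][0]=find_distance(positions, y, x, 0)
--       compact[(y,x)][1]=find_distance(positions,y, x, 1)
--       compact[(y,x)][2]=find_distance(positions,y, x, 2)
--       compact[(y,x)][3]=find_distance(positions,y, x, 3)
--   return compact
-- ===== SOURCE B (Python) =====
-- # Dynamic programming: each direction's distance table is filled in one sweep,
-- # every cell's distance coming from the already-computed neighbouring cell's value,
-- # instead of re-walking the whole ray from every cell.
--
-- def _cell_free(H, y, x, row):
--     # walk condition of the task at (y, x); only called with 0 <= y < H and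
--     # 0 <= x < len(row), row = positions[y], so x < len(row) needs no re-check
--     return y > 0 and x > 0 and y < H and row[x] == 0
--
--
-- def _ups(positions, H):
--     ups = []
--     prev = []
--     for y in range(H):
--         row = positions[y]
--         cur = []
--         for x in range(len(row)):
--             if _cell_free(H, y, x, row):
--                 cur.append(1 + (prev[x] if x < len(prev) else 0))
--             else:
--                 cur.append(0)
--         ups.append(cur)
--         prev = cur
--     return ups
--
--
-- def _downs(positions, H):
--     downs_rev = []
--     nxt = []
--     for y in range(H - 1, -1, -1):
--         row = positions[y]
--         cur = []
--         for x in range(len(row)):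
--             if _cell_free(H, y, x, row):
--                 cur.append(1 + (nxt[x] if x < len(nxt) else 0))
--             else:
--                 cur.append(0)
--         downs_rev.append(cur)
--         nxt = cur
--     return list(reversed(downs_rev))
--
--
-- def _lefts(positions, H):
--     lefts = []
--     for y in range(H):
--         row = positions[y]
--         cur = []
--         carry = 0
--         for x in range(len(row)):
--             carry = 1 + carry if _cell_free(H, y, x, row) else 0
--             cur.append(carry)
--         lefts.append(cur)
--     return lefts
--
--
-- def _rights(positions, H):
--     rights = []
--     for y in range(H):
--         row = positions[y]
--         cur = []
--         carry = 0
--         for x in range(len(row) - 1, -1, -1):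
--             carry = 1 + carry if _cell_free(H, y, x, row) else 0
--             cur.append(carry)
--         rights.append(list(reversed(cur)))
--     return rights
--
--
-- def compact_positions(positions):
--     H = len(positions)
--     ups = _ups(positions, H)
--     downs = _downs(positions, H)
--     lefts = _lefts(positions, H)
--     rights = _rights(positions, H)
--     out = {}
--     for y in range(H):
--         for x in range(len(positions[y])):
--             out[(y, x)] = {0: ups[y][x], 1: rights[y][x], 2: downs[y][x], 3: lefts[y][x]}
--     return out
-- ===== Notes on version B (the rewrite author's own statement) =====
-- stated objective: alternative
-- what changed: Replaces A's per-cell ray walking (re-walking the ray in each of the 4 directions from every cell, O(N+M) per cell on open grids) with four dynamic-programming sweeps that fill each direction's distance table in one pass, each cell's distance derived from the already-computed neighbouring cell's value.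
import Mathlib
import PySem

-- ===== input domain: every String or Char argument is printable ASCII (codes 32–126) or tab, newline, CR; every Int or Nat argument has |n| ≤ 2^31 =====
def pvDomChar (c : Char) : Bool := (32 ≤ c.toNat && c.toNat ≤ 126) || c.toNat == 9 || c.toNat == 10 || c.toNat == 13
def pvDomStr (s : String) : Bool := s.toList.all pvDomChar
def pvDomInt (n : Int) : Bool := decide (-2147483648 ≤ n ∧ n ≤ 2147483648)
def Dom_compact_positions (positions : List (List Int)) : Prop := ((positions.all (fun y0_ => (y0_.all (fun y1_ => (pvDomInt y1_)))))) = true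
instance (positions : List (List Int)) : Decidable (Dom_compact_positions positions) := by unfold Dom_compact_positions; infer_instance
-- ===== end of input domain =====

-- B replaces A's per-cell ray walk (4 walks of up to N+M steps from every cell) by four
-- one-pass dynamic-programming sweeps; equal return value on every input, A is total.

-- ===== PORT A =====
-- helper `move` of the original; the Python returns None for a direction outside 0..3
-- (never passed by compact_positions), so the last branch stands for d == 3.
def pvMove (p : Int × Int × Int) : Int × Int × Int :=
  let (y, x, d) := p
  if d = 0 then (y - 1, x, d)
  else if d = 1 then (y, x + 1, d)
  else if d = 2 then (y + 1, x, d)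
  else (y, x - 1, d)

-- the while-loop of find_distance; the Nat argument is fuel, a totality device only:
-- with the fuel find_distance supplies, the loop always stops on its own condition
-- for the calls compact_positions makes.
def pvFdLoop (positions : List (List Int)) : Nat → Int → Int → Int → Int → Int
  | 0, _, _, _, count => count
  | fuel + 1, y, x, d, count =>
    if 0 < y ∧ 0 < x ∧ y < PySem.List.len positions ∧
        x < PySem.List.len (PySem.List.pyGetD positions y []) ∧
        PySem.List.pyGetD (PySem.List.pyGetD positions y []) x 0 = 0 then
      let p := pvMove (y, x, d)
      pvFdLoop positions fuel p.1 p.2.1 p.2.2 (count + 1)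
    else count

def find_distance (positions : List (List Int)) (y x d : Int) : Int :=
  pvFdLoop positions (positions.length + positions.foldl (fun m r => max m r.length) 0 + 1) y x d 0

-- Python creates a fresh inner dict at (y,x) and then sets its four keys; by aliasing
-- the final compact[(y,x)] is exactly that four-entry dict, built here before the insert.
def compact_positions (positions : List (List Int)) : List (Int × Int × List (Int × Int)) :=
  let compact :=
    (PySem.List.pyRange 0 (PySem.List.len positions) 1).foldl (fun c y =>
      (PySem.List.pyRange 0 (PySem.List.len (PySem.List.pyGetD positions y [])) 1).foldl (fun c x =>
        c.insert (y, x)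
          (((((PySem.Dict.empty : PySem.Dict Int Int).insert 0 (find_distance positions y x 0)).insert 1
              (find_distance positions y x 1)).insert 2
              (find_distance positions y x 2)).insert 3
              (find_distance positions y x 3))) c)
      (PySem.Dict.empty : PySem.Dict (Int × Int) (PySem.Dict Int Int))
  compact.items.map (fun p => (p.1.1, p.1.2, p.2.items))

-- ===== PORT B =====
def pvCellFree (H y x : Int) (row : List Int) : Bool :=
  decide (0 < y) && decide (0 < x) && decide (y < H) && (PySem.List.pyGetD row x 0 == 0)

def pvUps (positions : List (List Int)) (H : Int) : List (List Int) :=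
  ((PySem.List.pyRange 0 H 1).foldl (fun (st : List (List Int) × List Int) y =>
    let row := PySem.List.pyGetD positions y []
    let cur := (PySem.List.pyRange 0 (PySem.List.len row) 1).foldl (fun cur x =>
      if pvCellFree H y x row then
        cur ++ [1 + (if x < PySem.List.len st.2 then PySem.List.pyGetD st.2 x 0 else 0)]
      else cur ++ [0]) ([] : List Int)
    (st.1 ++ [cur], cur)) ([], [])).1

def pvDowns (positions : List (List Int)) (H : Int) : List (List Int) :=
  ((PySem.List.pyRange (H - 1) (-1) (-1)).foldl (fun (st : List (List Int) × List Int) y =>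
    let row := PySem.List.pyGetD positions y []
    let cur := (PySem.List.pyRange 0 (PySem.List.len row) 1).foldl (fun cur x =>
      if pvCellFree H y x row then
        cur ++ [1 + (if x < PySem.List.len st.2 then PySem.List.pyGetD st.2 x 0 else 0)]
      else cur ++ [0]) ([] : List Int)
    (st.1 ++ [cur], cur)) ([], [])).1.reverse

def pvLefts (positions : List (List Int)) (H : Int) : List (List Int) :=
  (PySem.List.pyRange 0 H 1).foldl (fun acc y =>
    let row := PySem.List.pyGetD positions y []
    let cc := (PySem.List.pyRange 0 (PySem.List.len row) 1).foldl
      (fun (cc : List Int × Int) x =>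
        let carry := if pvCellFree H y x row then 1 + cc.2 else 0
        (cc.1 ++ [carry], carry)) ([], 0)
    acc ++ [cc.1]) ([] : List (List Int))

def pvRights (positions : List (List Int)) (H : Int) : List (List Int) :=
  (PySem.List.pyRange 0 H 1).foldl (fun acc y =>
    let row := PySem.List.pyGetD positions y []
    let cc := (PySem.List.pyRange (PySem.List.len row - 1) (-1) (-1)).foldl
      (fun (cc : List Int × Int) x =>
        let carry := if pvCellFree H y x row then 1 + cc.2 else 0
        (cc.1 ++ [carry], carry)) ([], 0)
    acc ++ [cc.1.reverse]) ([] : List (List Int))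

def compact_positions_alt (positions : List (List Int)) : List (Int × Int × List (Int × Int)) :=
  let H : Int := PySem.List.len positions
  let ups := pvUps positions H
  let downs := pvDowns positions H
  let lefts := pvLefts positions H
  let rights := pvRights positions H
  let out :=
    (PySem.List.pyRange 0 H 1).foldl (fun c y =>
      (PySem.List.pyRange 0 (PySem.List.len (PySem.List.pyGetD positions y [])) 1).foldl (fun c x =>
        c.insert (y, x) (PySem.Dict.ofList
          [(0, PySem.List.pyGetD (PySem.List.pyGetD ups y []) x 0),
           (1, PySem.List.pyGetD (PySem.List.pyGetD rights y []) x 0),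
           (2, PySem.List.pyGetD (PySem.List.pyGetD downs y []) x 0),
           (3, PySem.List.pyGetD (PySem.List.pyGetD lefts y []) x 0)])) c)
      (PySem.Dict.empty : PySem.Dict (Int × Int) (PySem.Dict Int Int))
  out.items.map (fun p => (p.1.1, p.1.2, p.2.items))

-- ===== PRECONDITION & SPEC =====
def Spec_compact_positions (positions : List (List Int)) (out : List (Int × Int × List (Int × Int))) : Prop := out = compact_positions_alt positions
instance (positions : List (List Int)) (out : List (Int × Int × List (Int × Int))) : Decidable (Spec_compact_positions positions out) := by unfold Spec_compact_positions; infer_instance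

-- ===== CLAIM (what is proved, stated in full; the proofs are below) =====
def Claim_equal_compact_positions : Prop := ∀ (positions : List (List Int)), Dom_compact_positions positions → Spec_compact_positions positions (compact_positions positions)

-- ===== LEMMAS AND PROOFS =====

-- reference distances: dist(y, x, d) = free? 1 + dist(next cell, d) : 0
def pvDistU (positions : List (List Int)) (y x : Int) : Int :=
  if h : 0 < y ∧ 0 < x ∧ y < PySem.List.len positions ∧
      x < PySem.List.len (PySem.List.pyGetD positions y []) ∧
      PySem.List.pyGetD (PySem.List.pyGetD positions y []) x 0 = 0 then
    1 + pvDistU positions (y - 1) x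
  else 0
termination_by y.toNat
decreasing_by have := h.1; omega

def pvDistR (positions : List (List Int)) (y x : Int) : Int :=
  if h : 0 < y ∧ 0 < x ∧ y < PySem.List.len positions ∧
      x < PySem.List.len (PySem.List.pyGetD positions y []) ∧
      PySem.List.pyGetD (PySem.List.pyGetD positions y []) x 0 = 0 then
    1 + pvDistR positions y (x + 1)
  else 0
termination_by (PySem.List.len (PySem.List.pyGetD positions y []) - x).toNat
decreasing_by have := h.2.2.2.1; omega

def pvDistD (positions : List (List Int)) (y x : Int) : Int :=
  if h : 0 < y ∧ 0 < x ∧ y < PySem.List.len positions ∧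
      x < PySem.List.len (PySem.List.pyGetD positions y []) ∧
      PySem.List.pyGetD (PySem.List.pyGetD positions y []) x 0 = 0 then
    1 + pvDistD positions (y + 1) x
  else 0
termination_by (PySem.List.len positions - y).toNat
decreasing_by have := h.2.2.1; omega

def pvDistL (positions : List (List Int)) (y x : Int) : Int :=
  if h : 0 < y ∧ 0 < x ∧ y < PySem.List.len positions ∧
      x < PySem.List.len (PySem.List.pyGetD positions y []) ∧
      PySem.List.pyGetD (PySem.List.pyGetD positions y []) x 0 = 0 then
    1 + pvDistL positions y (x - 1)
  else 0
termination_by x.toNat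
decreasing_by have := h.2.1; omega

-- the (y, x) key list both ports iterate over
def pvPairs (positions : List (List Int)) : List (Int × Int) :=
  (PySem.List.pyRange 0 (PySem.List.len positions) 1).flatMap (fun y =>
    (PySem.List.pyRange 0 (PySem.List.len (PySem.List.pyGetD positions y [])) 1).map (fun x => (y, x)))


-- ---- basic facts about the reference distances ----

theorem pvDistU_pos (positions : List (List Int)) (y x : Int)
    (h : 0 < y ∧ 0 < x ∧ y < PySem.List.len positions ∧
      x < PySem.List.len (PySem.List.pyGetD positions y []) ∧
      PySem.List.pyGetD (PySem.List.pyGetD positions y []) x 0 = 0) :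
    pvDistU positions y x = 1 + pvDistU positions (y - 1) x := by
  rw [pvDistU, dif_pos h]

theorem pvDistU_zero (positions : List (List Int)) (y x : Int)
    (h : ¬ (0 < y ∧ 0 < x ∧ y < PySem.List.len positions ∧
      x < PySem.List.len (PySem.List.pyGetD positions y []) ∧
      PySem.List.pyGetD (PySem.List.pyGetD positions y []) x 0 = 0)) :
    pvDistU positions y x = 0 := by
  rw [pvDistU, dif_neg h]

theorem pvDistR_pos (positions : List (List Int)) (y x : Int)
    (h : 0 < y ∧ 0 < x ∧ y < PySem.List.len positions ∧
      x < PySem.List.len (PySem.List.pyGetD positions y []) ∧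
      PySem.List.pyGetD (PySem.List.pyGetD positions y []) x 0 = 0) :
    pvDistR positions y x = 1 + pvDistR positions y (x + 1) := by
  rw [pvDistR, dif_pos h]

theorem pvDistR_zero (positions : List (List Int)) (y x : Int)
    (h : ¬ (0 < y ∧ 0 < x ∧ y < PySem.List.len positions ∧
      x < PySem.List.len (PySem.List.pyGetD positions y []) ∧
      PySem.List.pyGetD (PySem.List.pyGetD positions y []) x 0 = 0)) :
    pvDistR positions y x = 0 := by
  rw [pvDistR, dif_neg h]

theorem pvDistD_pos (positions : List (List Int)) (y x : Int)
    (h : 0 < y ∧ 0 < x ∧ y < PySem.List.len positions ∧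
      x < PySem.List.len (PySem.List.pyGetD positions y []) ∧
      PySem.List.pyGetD (PySem.List.pyGetD positions y []) x 0 = 0) :
    pvDistD positions y x = 1 + pvDistD positions (y + 1) x := by
  rw [pvDistD, dif_pos h]

theorem pvDistD_zero (positions : List (List Int)) (y x : Int)
    (h : ¬ (0 < y ∧ 0 < x ∧ y < PySem.List.len positions ∧
      x < PySem.List.len (PySem.List.pyGetD positions y []) ∧
      PySem.List.pyGetD (PySem.List.pyGetD positions y []) x 0 = 0)) :
    pvDistD positions y x = 0 := by
  rw [pvDistD, dif_neg h]

theorem pvDistL_pos (positions : List (List Int)) (y x : Int)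
    (h : 0 < y ∧ 0 < x ∧ y < PySem.List.len positions ∧
      x < PySem.List.len (PySem.List.pyGetD positions y []) ∧
      PySem.List.pyGetD (PySem.List.pyGetD positions y []) x 0 = 0) :
    pvDistL positions y x = 1 + pvDistL positions y (x - 1) := by
  rw [pvDistL, dif_pos h]

theorem pvDistL_zero (positions : List (List Int)) (y x : Int)
    (h : ¬ (0 < y ∧ 0 < x ∧ y < PySem.List.len positions ∧
      x < PySem.List.len (PySem.List.pyGetD positions y []) ∧
      PySem.List.pyGetD (PySem.List.pyGetD positions y []) x 0 = 0)) :
    pvDistL positions y x = 0 := by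
  rw [pvDistL, dif_neg h]

-- ---- A's while-loop computes the reference distance (one lemma per direction) ----

theorem pvFdLoopU (positions : List (List Int)) :
    ∀ (fuel : Nat) (y x c : Int), y.toNat ≤ fuel →
      pvFdLoop positions fuel y x 0 c = c + pvDistU positions y x := by
  intro fuel
  induction fuel with
  | zero =>
    intro y x c h
    rw [pvDistU_zero positions y x (by intro hc; have := hc.1; omega)]
    simp [pvFdLoop]
  | succ f ih =>
    intro y x c h
    by_cases hc : 0 < y ∧ 0 < x ∧ y < PySem.List.len positions ∧
        x < PySem.List.len (PySem.List.pyGetD positions y []) ∧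
        PySem.List.pyGetD (PySem.List.pyGetD positions y []) x 0 = 0
    · have hmv : pvMove (y, x, 0) = (y - 1, x, 0) := by simp [pvMove]
      simp only [pvFdLoop, if_pos hc, hmv]
      rw [ih (y - 1) x (c + 1) (by have := hc.1; omega), pvDistU_pos positions y x hc]
      ring
    · simp only [pvFdLoop, if_neg hc]
      rw [pvDistU_zero positions y x hc]
      ring

theorem pvFdLoopR (positions : List (List Int)) :
    ∀ (fuel : Nat) (y x c : Int),
      (PySem.List.len (PySem.List.pyGetD positions y []) - x).toNat ≤ fuel →
      pvFdLoop positions fuel y x 1 c = c + pvDistR positions y x := by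
  intro fuel
  induction fuel with
  | zero =>
    intro y x c h
    rw [pvDistR_zero positions y x (by intro hc; have := hc.2.2.2.1; omega)]
    simp [pvFdLoop]
  | succ f ih =>
    intro y x c h
    by_cases hc : 0 < y ∧ 0 < x ∧ y < PySem.List.len positions ∧
        x < PySem.List.len (PySem.List.pyGetD positions y []) ∧
        PySem.List.pyGetD (PySem.List.pyGetD positions y []) x 0 = 0
    · have hmv : pvMove (y, x, 1) = (y, x + 1, 1) := by simp [pvMove]
      simp only [pvFdLoop, if_pos hc, hmv]
      rw [ih y (x + 1) (c + 1) (by have := hc.2.2.2.1; omega), pvDistR_pos positions y x hc]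
      ring
    · simp only [pvFdLoop, if_neg hc]
      rw [pvDistR_zero positions y x hc]
      ring

theorem pvFdLoopD (positions : List (List Int)) :
    ∀ (fuel : Nat) (y x c : Int), (PySem.List.len positions - y).toNat ≤ fuel →
      pvFdLoop positions fuel y x 2 c = c + pvDistD positions y x := by
  intro fuel
  induction fuel with
  | zero =>
    intro y x c h
    rw [pvDistD_zero positions y x (by intro hc; have := hc.2.2.1; omega)]
    simp [pvFdLoop]
  | succ f ih =>
    intro y x c h
    by_cases hc : 0 < y ∧ 0 < x ∧ y < PySem.List.len positions ∧
        x < PySem.List.len (PySem.List.pyGetD positions y []) ∧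
        PySem.List.pyGetD (PySem.List.pyGetD positions y []) x 0 = 0
    · have hmv : pvMove (y, x, 2) = (y + 1, x, 2) := by simp [pvMove]
      simp only [pvFdLoop, if_pos hc, hmv]
      rw [ih (y + 1) x (c + 1) (by have := hc.2.2.1; omega), pvDistD_pos positions y x hc]
      ring
    · simp only [pvFdLoop, if_neg hc]
      rw [pvDistD_zero positions y x hc]
      ring

theorem pvFdLoopL (positions : List (List Int)) :
    ∀ (fuel : Nat) (y x c : Int), x.toNat ≤ fuel →
      pvFdLoop positions fuel y x 3 c = c + pvDistL positions y x := by
  intro fuel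
  induction fuel with
  | zero =>
    intro y x c h
    rw [pvDistL_zero positions y x (by intro hc; have := hc.2.1; omega)]
    simp [pvFdLoop]
  | succ f ih =>
    intro y x c h
    by_cases hc : 0 < y ∧ 0 < x ∧ y < PySem.List.len positions ∧
        x < PySem.List.len (PySem.List.pyGetD positions y []) ∧
        PySem.List.pyGetD (PySem.List.pyGetD positions y []) x 0 = 0
    · have hmv : pvMove (y, x, 3) = (y, x - 1, 3) := by simp [pvMove]
      simp only [pvFdLoop, if_pos hc, hmv]
      rw [ih y (x - 1) (c + 1) (by have := hc.2.1; omega), pvDistL_pos positions y x hc]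
      ring
    · simp only [pvFdLoop, if_neg hc]
      rw [pvDistL_zero positions y x hc]
      ring

-- find_distance's fuel is big enough for every in-grid start
theorem pvFindDistance (positions : List (List Int)) (y x : Int)
    (h0y : 0 ≤ y) (h1y : y < PySem.List.len positions)
    (h0x : 0 ≤ x) (h1x : x < PySem.List.len (PySem.List.pyGetD positions y [])) :
    find_distance positions y x 0 = pvDistU positions y x ∧
    find_distance positions y x 1 = pvDistR positions y x ∧
    find_distance positions y x 2 = pvDistD positions y x ∧
    find_distance positions y x 3 = pvDistL positions y x := by
  have hrow : (PySem.List.pyGetD positions y []).length ≤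
      positions.foldl (fun m r => max m r.length) 0 := by
    refine (PySem.List.le_foldl_max_nat positions List.length 0).2 _ ?_
    exact PySem.List.pyGetD_mem positions []
      (by simp [PySem.Raise.InRange, PySem.List.len_eq] at h1y ⊢; omega)
  have hlen := PySem.List.len_eq positions
  have hlenr := PySem.List.len_eq (PySem.List.pyGetD positions y [])
  refine ⟨?_, ?_, ?_, ?_⟩
  · exact (pvFdLoopU positions _ y x 0 (by omega)).trans (by ring)
  · exact (pvFdLoopR positions _ y x 0 (by omega)).trans (by ring)
  · exact (pvFdLoopD positions _ y x 0 (by omega)).trans (by ring)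
  · exact (pvFdLoopL positions _ y x 0 (by omega)).trans (by ring)

-- ---- generic helpers about rows stored as (List.range n).map ----

theorem pvCellFree_iff (positions : List (List Int)) (y x : Int)
    (hx : x < PySem.List.len (PySem.List.pyGetD positions y [])) :
    pvCellFree (PySem.List.len positions) y x (PySem.List.pyGetD positions y []) = true ↔
      (0 < y ∧ 0 < x ∧ y < PySem.List.len positions ∧
        x < PySem.List.len (PySem.List.pyGetD positions y []) ∧
        PySem.List.pyGetD (PySem.List.pyGetD positions y []) x 0 = 0) := by
  simp only [pvCellFree, Bool.and_eq_true, decide_eq_true_eq, beq_iff_eq]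
  tauto

theorem pvGuard_eq (g : Int → Int) (n : Nat) (x : Int) (hx : 0 ≤ x)
    (h0 : ∀ z : Int, (n : Int) ≤ z → g z = 0) :
    (if x < PySem.List.len ((List.range n).map (fun (k : Nat) => g (k : Int))) then
        PySem.List.pyGetD ((List.range n).map (fun (k : Nat) => g (k : Int))) x 0 else 0) = g x := by
  by_cases h : x < (n : Int)
  · rw [if_pos (by simpa [PySem.List.len_eq] using h)]
    rw [PySem.List.pyGetD_eq_getElem _ _ hx (by simpa using h)]
    rw [List.getElem_map, List.getElem_range]
    congr 1
    omega
  · rw [if_neg (by simpa [PySem.List.len_eq] using h)]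
    exact (h0 x (by omega)).symm

theorem pvLookup {α : Type} (g : Int → α) (n : Nat) (x : Int) (d : α)
    (h0 : 0 ≤ x) (h1 : x < (n : Int)) :
    PySem.List.pyGetD ((List.range n).map (fun (k : Nat) => g (k : Int))) x d = g x := by
  rw [PySem.List.pyGetD_eq_getElem _ _ h0 (by simpa using h1)]
  rw [List.getElem_map, List.getElem_range]
  congr 1
  omega

theorem pvRevMap {α : Type} (g : Int → α) (n : Nat) :
    ((List.range n).map (fun (k : Nat) => g ((n : Int) - 1 - (k : Int)))).reverse =
      (List.range n).map (fun (k : Nat) => g (k : Int)) := by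
  apply List.ext_getElem (by simp)
  intro i h1 h2
  simp only [List.getElem_reverse, List.length_map, List.length_range]
  rw [List.getElem_map, List.getElem_map, List.getElem_range, List.getElem_range]
  congr 1
  simp at h2
  omega

-- ---- one DP row from the row below/above it ----

theorem pvRowU (positions : List (List Int)) (y : Int) (prev : List Int)
    (hprev : ∀ x : Int, 0 ≤ x →
      (if x < PySem.List.len prev then PySem.List.pyGetD prev x 0 else 0) =
        pvDistU positions (y - 1) x) :
    (PySem.List.pyRange 0 (PySem.List.len (PySem.List.pyGetD positions y [])) 1).foldl
      (fun cur x =>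
        if pvCellFree (PySem.List.len positions) y x (PySem.List.pyGetD positions y []) then
          cur ++ [1 + (if x < PySem.List.len prev then PySem.List.pyGetD prev x 0 else 0)]
        else cur ++ [0]) ([] : List Int)
    = (List.range (PySem.List.pyGetD positions y []).length).map
        (fun (k : Nat) => pvDistU positions y (k : Int)) := by
  rw [PySem.List.foldl_congr_mem _ _
      (fun (cur : List Int) x => cur ++ [pvDistU positions y x]) _ ?_]
  · rw [PySem.List.foldl_append_singleton_eq_map, PySem.List.len_eq,
      PySem.List.pyRange_zero_nat, List.map_map]
    rfl
  · intro cur x hxmem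
    have hxb := PySem.List.mem_pyRange_one.mp hxmem
    by_cases hc : 0 < y ∧ 0 < x ∧ y < PySem.List.len positions ∧
        x < PySem.List.len (PySem.List.pyGetD positions y []) ∧
        PySem.List.pyGetD (PySem.List.pyGetD positions y []) x 0 = 0
    · rw [if_pos ((pvCellFree_iff positions y x hxb.2).mpr hc), hprev x hxb.1,
        ← pvDistU_pos positions y x hc]
    · rw [if_neg (fun hf => hc ((pvCellFree_iff positions y x hxb.2).mp hf))]
      show cur ++ [0] = cur ++ [pvDistU positions y x]
      rw [pvDistU_zero positions y x hc]

theorem pvRowD (positions : List (List Int)) (y : Int) (prev : List Int)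
    (hprev : ∀ x : Int, 0 ≤ x →
      (if x < PySem.List.len prev then PySem.List.pyGetD prev x 0 else 0) =
        pvDistD positions (y + 1) x) :
    (PySem.List.pyRange 0 (PySem.List.len (PySem.List.pyGetD positions y [])) 1).foldl
      (fun cur x =>
        if pvCellFree (PySem.List.len positions) y x (PySem.List.pyGetD positions y []) then
          cur ++ [1 + (if x < PySem.List.len prev then PySem.List.pyGetD prev x 0 else 0)]
        else cur ++ [0]) ([] : List Int)
    = (List.range (PySem.List.pyGetD positions y []).length).map
        (fun (k : Nat) => pvDistD positions y (k : Int)) := by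
  rw [PySem.List.foldl_congr_mem _ _
      (fun (cur : List Int) x => cur ++ [pvDistD positions y x]) _ ?_]
  · rw [PySem.List.foldl_append_singleton_eq_map, PySem.List.len_eq,
      PySem.List.pyRange_zero_nat, List.map_map]
    rfl
  · intro cur x hxmem
    have hxb := PySem.List.mem_pyRange_one.mp hxmem
    by_cases hc : 0 < y ∧ 0 < x ∧ y < PySem.List.len positions ∧
        x < PySem.List.len (PySem.List.pyGetD positions y []) ∧
        PySem.List.pyGetD (PySem.List.pyGetD positions y []) x 0 = 0
    · rw [if_pos ((pvCellFree_iff positions y x hxb.2).mpr hc), hprev x hxb.1,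
        ← pvDistD_pos positions y x hc]
    · rw [if_neg (fun hf => hc ((pvCellFree_iff positions y x hxb.2).mp hf))]
      show cur ++ [0] = cur ++ [pvDistD positions y x]
      rw [pvDistD_zero positions y x hc]

-- ---- the four DP sweeps produce the reference distance tables ----

def pvURowF (positions : List (List Int)) (y : Int) : List Int :=
  (List.range (PySem.List.pyGetD positions y []).length).map
    (fun (k : Nat) => pvDistU positions y (k : Int))

def pvDRowF (positions : List (List Int)) (y : Int) : List Int :=
  (List.range (PySem.List.pyGetD positions y []).length).map
    (fun (k : Nat) => pvDistD positions y (k : Int))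

def pvLRowF (positions : List (List Int)) (y : Int) : List Int :=
  (List.range (PySem.List.pyGetD positions y []).length).map
    (fun (k : Nat) => pvDistL positions y (k : Int))

def pvRRowF (positions : List (List Int)) (y : Int) : List Int :=
  (List.range (PySem.List.pyGetD positions y []).length).map
    (fun (k : Nat) => pvDistR positions y (k : Int))

-- the row step shared by the up and down sweeps (prev/nxt row carried in .2)
def pvUpStep (positions : List (List Int)) :
    (List (List Int) × List Int) → Int → (List (List Int) × List Int) :=
  fun st y =>
    let row := PySem.List.pyGetD positions y []
    let cur := (PySem.List.pyRange 0 (PySem.List.len row) 1).foldl (fun cur x =>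
      if pvCellFree (PySem.List.len positions) y x row then
        cur ++ [1 + (if x < PySem.List.len st.2 then PySem.List.pyGetD st.2 x 0 else 0)]
      else cur ++ [0]) ([] : List Int)
    (st.1 ++ [cur], cur)

theorem pvUps_fold (positions : List (List Int)) :
    pvUps positions (PySem.List.len positions) =
      ((PySem.List.pyRange 0 (PySem.List.len positions) 1).foldl (pvUpStep positions) ([], [])).1 := rfl

theorem pvDowns_fold (positions : List (List Int)) :
    pvDowns positions (PySem.List.len positions) =
      ((PySem.List.pyRange (PySem.List.len positions - 1) (-1) (-1)).foldl
        (pvUpStep positions) ([], [])).1.reverse := rfl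

theorem pvUpsAux (positions : List (List Int)) : ∀ (m : Nat),
    ((PySem.List.pyRange 0 (m : Int) 1).foldl (pvUpStep positions) ([], [])).1 =
      (List.range m).map (fun (j : Nat) => pvURowF positions (j : Int)) ∧
    (∀ x : Int, 0 ≤ x →
      (if x < PySem.List.len ((PySem.List.pyRange 0 (m : Int) 1).foldl (pvUpStep positions) ([], [])).2
        then PySem.List.pyGetD ((PySem.List.pyRange 0 (m : Int) 1).foldl (pvUpStep positions) ([], [])).2 x 0
        else 0) = pvDistU positions ((m : Int) - 1) x) := by
  intro m
  induction m with
  | zero =>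
    have hnil : PySem.List.pyRange 0 ((0 : Nat) : Int) 1 = [] :=
      PySem.List.pyRange_one_eq_nil (by norm_num)
    constructor
    · rw [hnil]
      simp
    · intro x hx
      rw [hnil]
      simp only [List.foldl_nil]
      rw [if_neg (by simp [PySem.List.len_eq]; omega)]
      exact (pvDistU_zero positions _ x (by intro hc; have := hc.1; omega)).symm
  | succ m ih =>
    obtain ⟨ih1, ih2⟩ := ih
    have hsplit : PySem.List.pyRange 0 ((m + 1 : Nat) : Int) 1 =
        PySem.List.pyRange 0 (m : Int) 1 ++ [(m : Int)] := by
      push_cast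
      exact PySem.List.pyRange_one_succ_right (by omega)
    have hstep : pvUpStep positions
        ((PySem.List.pyRange 0 (m : Int) 1).foldl (pvUpStep positions) ([], [])) (m : Int) =
        (((PySem.List.pyRange 0 (m : Int) 1).foldl (pvUpStep positions) ([], [])).1 ++
          [pvURowF positions (m : Int)], pvURowF positions (m : Int)) := by
      simp only [pvUpStep]
      rw [pvRowU positions (m : Int)
        ((PySem.List.pyRange 0 (m : Int) 1).foldl (pvUpStep positions) ([], [])).2 ih2]
      rfl
    constructor
    · rw [hsplit, List.foldl_append]
      simp only [List.foldl_cons, List.foldl_nil]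
      rw [hstep]
      simp only [ih1]
      rw [List.range_succ, List.map_append]
      rfl
    · intro x hx
      rw [hsplit, List.foldl_append]
      simp only [List.foldl_cons, List.foldl_nil]
      rw [hstep]
      have hcast : ((m + 1 : Nat) : Int) - 1 = (m : Int) := by push_cast; ring
      rw [hcast]
      unfold pvURowF
      exact pvGuard_eq (fun z => pvDistU positions (m : Int) z) _ x hx
        (by
          intro z hz
          refine pvDistU_zero positions _ z (fun hc => ?_)
          have := hc.2.2.2.1
          rw [PySem.List.len_eq] at this
          omega)

theorem pvUps_char (positions : List (List Int)) :
    pvUps positions (PySem.List.len positions) =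
      (List.range positions.length).map (fun (j : Nat) => pvURowF positions (j : Int)) := by
  rw [pvUps_fold, PySem.List.len_eq]
  exact (pvUpsAux positions positions.length).1

theorem pvDownsAux (positions : List (List Int)) : ∀ (m : Nat) (acc : List (List Int)) (nxt : List Int),
    (∀ x : Int, 0 ≤ x →
      (if x < PySem.List.len nxt then PySem.List.pyGetD nxt x 0 else 0) = pvDistD positions (m : Int) x) →
    ((PySem.List.pyRange ((m : Int) - 1) (-1) (-1)).foldl (pvUpStep positions) (acc, nxt)).1 =
      acc ++ (List.range m).map (fun (j : Nat) => pvDRowF positions ((m : Int) - 1 - (j : Int))) := by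
  intro m
  induction m with
  | zero =>
    intro acc nxt _
    rw [PySem.List.pyRange_neg_one_eq_nil (by norm_num)]
    simp
  | succ m ih =>
    intro acc nxt h
    have hcons : PySem.List.pyRange (((m + 1 : Nat) : Int) - 1) (-1) (-1) =
        (m : Int) :: PySem.List.pyRange ((m : Int) - 1) (-1) (-1) := by
      have h1 : ((m + 1 : Nat) : Int) - 1 = (m : Int) := by push_cast; ring
      rw [h1]
      exact PySem.List.pyRange_neg_one_cons (by omega)
    have hstep : pvUpStep positions (acc, nxt) (m : Int) =
        (acc ++ [pvDRowF positions (m : Int)], pvDRowF positions (m : Int)) := by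
      simp only [pvUpStep]
      rw [pvRowD positions (m : Int) nxt
        (by intro x hx; rw [h x hx]; congr 1)]
      rfl
    rw [hcons, List.foldl_cons, hstep,
      ih (acc ++ [pvDRowF positions (m : Int)]) (pvDRowF positions (m : Int))
        (by
          intro x hx
          unfold pvDRowF
          exact pvGuard_eq (fun z => pvDistD positions (m : Int) z) _ x hx
            (by
              intro z hz
              refine pvDistD_zero positions _ z (fun hc => ?_)
              have := hc.2.2.2.1
              rw [PySem.List.len_eq] at this
              omega))]
    rw [List.append_assoc]
    congr 1
    rw [List.range_succ_eq_map, List.map_cons, List.map_map]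
    rw [List.singleton_append]
    congr 1
    · congr 1
      all_goals push_cast
      all_goals ring
    · apply List.map_congr_left
      intro j _
      show pvDRowF positions ((m : Int) - 1 - (j : Int)) =
        pvDRowF positions (((m + 1 : Nat) : Int) - 1 - ((j + 1 : Nat) : Int))
      congr 1
      push_cast
      ring

theorem pvDowns_char (positions : List (List Int)) :
    pvDowns positions (PySem.List.len positions) =
      (List.range positions.length).map (fun (j : Nat) => pvDRowF positions (j : Int)) := by
  rw [pvDowns_fold, PySem.List.len_eq]
  rw [pvDownsAux positions positions.length [] []
    (by
      intro x hx
      rw [if_neg (by simp [PySem.List.len_eq]; omega)]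
      refine (pvDistD_zero positions _ x (fun hc => ?_)).symm
      have := hc.2.2.1
      rw [PySem.List.len_eq] at this
      omega)]
  rw [List.nil_append]
  exact pvRevMap (fun z => pvDRowF positions z) positions.length

-- ---- the two horizontal scans ----

def pvScanStep (positions : List (List Int)) (y : Int) : (List Int × Int) → Int → (List Int × Int) :=
  fun cc x =>
    let carry := if pvCellFree (PySem.List.len positions) y x (PySem.List.pyGetD positions y [])
      then 1 + cc.2 else 0
    (cc.1 ++ [carry], carry)

theorem pvLefts_fold (positions : List (List Int)) :
    pvLefts positions (PySem.List.len positions) =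
      (PySem.List.pyRange 0 (PySem.List.len positions) 1).foldl (fun acc y =>
        acc ++ [((PySem.List.pyRange 0 (PySem.List.len (PySem.List.pyGetD positions y [])) 1).foldl
          (pvScanStep positions y) ([], 0)).1]) [] := rfl

theorem pvRights_fold (positions : List (List Int)) :
    pvRights positions (PySem.List.len positions) =
      (PySem.List.pyRange 0 (PySem.List.len positions) 1).foldl (fun acc y =>
        acc ++ [((PySem.List.pyRange (PySem.List.len (PySem.List.pyGetD positions y []) - 1) (-1) (-1)).foldl
          (pvScanStep positions y) ([], 0)).1.reverse]) [] := rfl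

theorem pvScanLAux (positions : List (List Int)) (y : Int) : ∀ (n : Nat),
    n ≤ (PySem.List.pyGetD positions y []).length →
    (PySem.List.pyRange 0 (n : Int) 1).foldl (pvScanStep positions y) ([], 0) =
      ((List.range n).map (fun (k : Nat) => pvDistL positions y (k : Int)),
        pvDistL positions y ((n : Int) - 1)) := by
  intro n
  induction n with
  | zero =>
    intro _
    rw [PySem.List.pyRange_one_eq_nil (by norm_num)]
    simp only [List.foldl_nil, List.range_zero, List.map_nil]
    refine Prod.ext rfl ?_
    show (0 : Int) = pvDistL positions y (((0 : Nat) : Int) - 1)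
    exact (pvDistL_zero positions y _ (by intro hc; have := hc.2.1; omega)).symm
  | succ n ih =>
    intro h
    have hsplit : PySem.List.pyRange 0 ((n + 1 : Nat) : Int) 1 =
        PySem.List.pyRange 0 (n : Int) 1 ++ [(n : Int)] := by
      push_cast
      exact PySem.List.pyRange_one_succ_right (by omega)
    rw [hsplit, List.foldl_append, ih (by omega)]
    simp only [List.foldl_cons, List.foldl_nil, pvScanStep]
    have hxlt : (n : Int) < PySem.List.len (PySem.List.pyGetD positions y []) := by
      rw [PySem.List.len_eq]; omega
    have hcarry : (if pvCellFree (PySem.List.len positions) y (n : Int) (PySem.List.pyGetD positions y [])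
        then 1 + pvDistL positions y ((n : Int) - 1) else 0) = pvDistL positions y (n : Int) := by
      by_cases hc : 0 < y ∧ 0 < (n : Int) ∧ y < PySem.List.len positions ∧
          (n : Int) < PySem.List.len (PySem.List.pyGetD positions y []) ∧
          PySem.List.pyGetD (PySem.List.pyGetD positions y []) (n : Int) 0 = 0
      · rw [if_pos ((pvCellFree_iff positions y (n : Int) hxlt).mpr hc),
          ← pvDistL_pos positions y (n : Int) hc]
      · rw [if_neg (fun hf => hc ((pvCellFree_iff positions y (n : Int) hxlt).mp hf)),
          pvDistL_zero positions y (n : Int) hc]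
    rw [hcarry]
    refine Prod.ext ?_ ?_
    · show (List.range n).map (fun (k : Nat) => pvDistL positions y (k : Int)) ++
        [pvDistL positions y (n : Int)] = _
      rw [List.range_succ, List.map_append]
      rfl
    · show pvDistL positions y (n : Int) = pvDistL positions y (((n + 1 : Nat) : Int) - 1)
      congr 1
      push_cast
      ring

theorem pvScanRAux (positions : List (List Int)) (y : Int) : ∀ (n : Nat) (acc : List Int) (c : Int),
    n ≤ (PySem.List.pyGetD positions y []).length →
    c = pvDistR positions y (n : Int) →
    ((PySem.List.pyRange ((n : Int) - 1) (-1) (-1)).foldl (pvScanStep positions y) (acc, c)).1 =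
      acc ++ (List.range n).map (fun (k : Nat) => pvDistR positions y ((n : Int) - 1 - (k : Int))) := by
  intro n
  induction n with
  | zero =>
    intro acc c _ _
    rw [PySem.List.pyRange_neg_one_eq_nil (by norm_num)]
    simp
  | succ n ih =>
    intro acc c h hc0
    have hcons : PySem.List.pyRange (((n + 1 : Nat) : Int) - 1) (-1) (-1) =
        (n : Int) :: PySem.List.pyRange ((n : Int) - 1) (-1) (-1) := by
      have h1 : ((n + 1 : Nat) : Int) - 1 = (n : Int) := by push_cast; ring
      rw [h1]
      exact PySem.List.pyRange_neg_one_cons (by omega)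
    have hxlt : (n : Int) < PySem.List.len (PySem.List.pyGetD positions y []) := by
      rw [PySem.List.len_eq]; omega
    have hcarry : (if pvCellFree (PySem.List.len positions) y (n : Int) (PySem.List.pyGetD positions y [])
        then 1 + c else 0) = pvDistR positions y (n : Int) := by
      rw [hc0]
      by_cases hc : 0 < y ∧ 0 < (n : Int) ∧ y < PySem.List.len positions ∧
          (n : Int) < PySem.List.len (PySem.List.pyGetD positions y []) ∧
          PySem.List.pyGetD (PySem.List.pyGetD positions y []) (n : Int) 0 = 0
      · rw [if_pos ((pvCellFree_iff positions y (n : Int) hxlt).mpr hc),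
          pvDistR_pos positions y (n : Int) hc]
        congr 2
      · rw [if_neg (fun hf => hc ((pvCellFree_iff positions y (n : Int) hxlt).mp hf)),
          pvDistR_zero positions y (n : Int) hc]
    have hstep : pvScanStep positions y (acc, c) (n : Int) =
        (acc ++ [pvDistR positions y (n : Int)], pvDistR positions y (n : Int)) := by
      simp only [pvScanStep]
      rw [hcarry]
    rw [hcons, List.foldl_cons, hstep,
      ih (acc ++ [pvDistR positions y (n : Int)]) (pvDistR positions y (n : Int)) (by omega) rfl]
    rw [List.append_assoc]
    congr 1
    rw [List.range_succ_eq_map, List.map_cons, List.map_map, List.singleton_append]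
    congr 1
    · congr 1
      all_goals push_cast
      all_goals ring
    · apply List.map_congr_left
      intro j _
      show pvDistR positions y ((n : Int) - 1 - (j : Int)) =
        pvDistR positions y (((n + 1 : Nat) : Int) - 1 - ((j + 1 : Nat) : Int))
      congr 1
      push_cast
      ring

theorem pvLefts_char (positions : List (List Int)) :
    pvLefts positions (PySem.List.len positions) =
      (List.range positions.length).map (fun (j : Nat) => pvLRowF positions (j : Int)) := by
  rw [pvLefts_fold, PySem.List.foldl_append_singleton_eq_map, PySem.List.len_eq,
    PySem.List.pyRange_zero_nat, List.map_map, List.nil_append]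
  apply List.map_congr_left
  intro j _
  show ((PySem.List.pyRange 0 (PySem.List.len (PySem.List.pyGetD positions (j : Int) [])) 1).foldl
    (pvScanStep positions (j : Int)) ([], 0)).1 = pvLRowF positions (j : Int)
  rw [PySem.List.len_eq, pvScanLAux positions (j : Int) _ (le_refl _)]
  rfl

theorem pvRights_char (positions : List (List Int)) :
    pvRights positions (PySem.List.len positions) =
      (List.range positions.length).map (fun (j : Nat) => pvRRowF positions (j : Int)) := by
  rw [pvRights_fold, PySem.List.foldl_append_singleton_eq_map, PySem.List.len_eq,
    PySem.List.pyRange_zero_nat, List.map_map, List.nil_append]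
  apply List.map_congr_left
  intro j _
  show ((PySem.List.pyRange (PySem.List.len (PySem.List.pyGetD positions (j : Int) []) - 1) (-1) (-1)).foldl
    (pvScanStep positions (j : Int)) ([], 0)).1.reverse = pvRRowF positions (j : Int)
  rw [PySem.List.len_eq, pvScanRAux positions (j : Int) _ [] 0 (le_refl _)
    ((pvDistR_zero positions (j : Int) _ (by
      intro hc
      have := hc.2.2.2.1
      rw [PySem.List.len_eq] at this
      omega)).symm)]
  rw [List.nil_append]
  exact pvRevMap (fun z => pvDistR positions (j : Int) z) _

-- ---- flattening the nested dict-building loop of both ports ----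

theorem pvFoldFlat {α β γ : Type} (l : List α) (g : α → List β) (step : γ → α → β → γ) (init : γ) :
    l.foldl (fun c y => (g y).foldl (fun c x => step c y x) c) init
      = (l.flatMap (fun y => (g y).map (fun x => (y, x)))).foldl (fun c p => step c p.1 p.2) init := by
  induction l generalizing init with
  | nil => rfl
  | cons a t ih =>
    simp only [List.foldl_cons, List.flatMap_cons, List.foldl_append, List.foldl_map]
    exact ih _

theorem pvPairsNodup (positions : List (List Int)) : (pvPairs positions).Nodup := by
  have haux : ∀ (l : List Int), l.Nodup →
      (l.flatMap (fun y =>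
        (PySem.List.pyRange 0 (PySem.List.len (PySem.List.pyGetD positions y [])) 1).map
          (fun x => (y, x)))).Nodup := by
    intro l hl
    induction l with
    | nil => simp
    | cons a t ih =>
      rw [List.flatMap_cons, List.nodup_append]
      obtain ⟨ha, ht⟩ := List.nodup_cons.mp hl
      refine ⟨List.Nodup.map (fun u v huv => by simpa using congrArg Prod.snd huv)
        (PySem.List.nodup_pyRange_one 0 _), ih ht, ?_⟩
      intro p hp1 q hq2
      obtain ⟨x1, _, hpx⟩ := List.mem_map.mp hp1
      obtain ⟨y2, hy2, hq'⟩ := List.mem_flatMap.mp hq2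
      obtain ⟨x2, _, hqx2⟩ := List.mem_map.mp hq'
      intro hpq
      apply ha
      have h1 : p.1 = a := by rw [← hpx]
      have h2 : q.1 = y2 := by rw [← hqx2]
      have h3 : a = y2 := by rw [← h1, hpq, h2]
      rw [h3]
      exact hy2
  unfold pvPairs
  exact haux _ (PySem.List.nodup_pyRange_one 0 _)

theorem pvBuildItems (positions : List (List Int)) (v : Int → Int → PySem.Dict Int Int) :
    ((PySem.List.pyRange 0 (PySem.List.len positions) 1).foldl (fun c y =>
        (PySem.List.pyRange 0 (PySem.List.len (PySem.List.pyGetD positions y [])) 1).foldl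
          (fun c x => c.insert (y, x) (v y x)) c)
      (PySem.Dict.empty : PySem.Dict (Int × Int) (PySem.Dict Int Int))).items
    = (pvPairs positions).map (fun p => ((p.1, p.2), v p.1 p.2)) := by
  rw [pvFoldFlat (PySem.List.pyRange 0 (PySem.List.len positions) 1)
    (fun y => PySem.List.pyRange 0 (PySem.List.len (PySem.List.pyGetD positions y [])) 1)
    (fun c y x => c.insert (y, x) (v y x))
    (PySem.Dict.empty : PySem.Dict (Int × Int) (PySem.Dict Int Int))]
  unfold pvPairs
  refine (PySem.Dict.items_foldl_insert_fresh _ (fun (p : Int × Int) => (p.1, p.2)) (fun (p : Int × Int) => v p.1 p.2)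
    PySem.Dict.empty (fun a _ => PySem.Dict.contains_empty _) ?_).trans ?_
  · have := pvPairsNodup positions
    unfold pvPairs at this
    simpa using this
  · rw [show (PySem.Dict.empty : PySem.Dict (Int × Int) (PySem.Dict Int Int)).items = [] from rfl]
    simp

-- ---- both ports as a map over the key list ----

theorem pvA_eq (positions : List (List Int)) :
    compact_positions positions = (pvPairs positions).map (fun (p : Int × Int) =>
      (p.1, p.2, [((0 : Int), find_distance positions p.1 p.2 0),
        ((1 : Int), find_distance positions p.1 p.2 1),
        ((2 : Int), find_distance positions p.1 p.2 2),
        ((3 : Int), find_distance positions p.1 p.2 3)])) := by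
  simp only [compact_positions]
  rw [pvBuildItems positions (fun y x =>
    ((((PySem.Dict.empty : PySem.Dict Int Int).insert 0 (find_distance positions y x 0)).insert 1
        (find_distance positions y x 1)).insert 2
        (find_distance positions y x 2)).insert 3
        (find_distance positions y x 3))]
  rw [List.map_map]
  rfl

theorem pvB_eq (positions : List (List Int)) :
    compact_positions_alt positions = (pvPairs positions).map (fun (p : Int × Int) =>
      (p.1, p.2,
        [((0 : Int), PySem.List.pyGetD (PySem.List.pyGetD (pvUps positions (PySem.List.len positions)) p.1 []) p.2 0),
         ((1 : Int), PySem.List.pyGetD (PySem.List.pyGetD (pvRights positions (PySem.List.len positions)) p.1 []) p.2 0),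
         ((2 : Int), PySem.List.pyGetD (PySem.List.pyGetD (pvDowns positions (PySem.List.len positions)) p.1 []) p.2 0),
         ((3 : Int), PySem.List.pyGetD (PySem.List.pyGetD (pvLefts positions (PySem.List.len positions)) p.1 []) p.2 0)])) := by
  simp only [compact_positions_alt]
  rw [pvBuildItems positions (fun y x => PySem.Dict.ofList
    [(0, PySem.List.pyGetD (PySem.List.pyGetD (pvUps positions (PySem.List.len positions)) y []) x 0),
     (1, PySem.List.pyGetD (PySem.List.pyGetD (pvRights positions (PySem.List.len positions)) y []) x 0),
     (2, PySem.List.pyGetD (PySem.List.pyGetD (pvDowns positions (PySem.List.len positions)) y []) x 0),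
     (3, PySem.List.pyGetD (PySem.List.pyGetD (pvLefts positions (PySem.List.len positions)) y []) x 0)])]
  rw [List.map_map]
  rfl

theorem compact_positions_spec : Claim_equal_compact_positions := by
  intro positions _
  unfold Spec_compact_positions
  rw [pvA_eq, pvB_eq]
  apply List.map_congr_left
  intro p hp
  unfold pvPairs at hp
  obtain ⟨y, hy, hp2⟩ := List.mem_flatMap.mp hp
  obtain ⟨x, hx, hpe⟩ := List.mem_map.mp hp2
  subst hpe
  have hyb := PySem.List.mem_pyRange_one.mp hy
  have hxb := PySem.List.mem_pyRange_one.mp hx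
  obtain ⟨hU, hR, hD, hL⟩ := pvFindDistance positions y x hyb.1 hyb.2 hxb.1 hxb.2
  have hlen := PySem.List.len_eq positions
  have hlenr := PySem.List.len_eq (PySem.List.pyGetD positions y [])
  have hups : PySem.List.pyGetD (pvUps positions (PySem.List.len positions)) y [] =
      pvURowF positions y := by
    rw [pvUps_char]
    exact pvLookup (fun z => pvURowF positions z) positions.length y [] hyb.1 (by omega)
  have hdowns : PySem.List.pyGetD (pvDowns positions (PySem.List.len positions)) y [] =
      pvDRowF positions y := by
    rw [pvDowns_char]
    exact pvLookup (fun z => pvDRowF positions z) positions.length y [] hyb.1 (by omega)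
  have hlefts : PySem.List.pyGetD (pvLefts positions (PySem.List.len positions)) y [] =
      pvLRowF positions y := by
    rw [pvLefts_char]
    exact pvLookup (fun z => pvLRowF positions z) positions.length y [] hyb.1 (by omega)
  have hrights : PySem.List.pyGetD (pvRights positions (PySem.List.len positions)) y [] =
      pvRRowF positions y := by
    rw [pvRights_char]
    exact pvLookup (fun z => pvRRowF positions z) positions.length y [] hyb.1 (by omega)
  have hgu : PySem.List.pyGetD (pvURowF positions y) x 0 = pvDistU positions y x := by
    unfold pvURowF
    exact pvLookup (fun z => pvDistU positions y z) _ x 0 hxb.1 (by omega)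
  have hgd : PySem.List.pyGetD (pvDRowF positions y) x 0 = pvDistD positions y x := by
    unfold pvDRowF
    exact pvLookup (fun z => pvDistD positions y z) _ x 0 hxb.1 (by omega)
  have hgl : PySem.List.pyGetD (pvLRowF positions y) x 0 = pvDistL positions y x := by
    unfold pvLRowF
    exact pvLookup (fun z => pvDistL positions y z) _ x 0 hxb.1 (by omega)
  have hgr : PySem.List.pyGetD (pvRRowF positions y) x 0 = pvDistR positions y x := by
    unfold pvRRowF
    exact pvLookup (fun z => pvDistR positions y z) _ x 0 hxb.1 (by omega)
  rw [hU, hR, hD, hL, hups, hdowns, hlefts, hrights, hgu, hgd, hgl, hgr]
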